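-- pv_equiv track=rewrite | github.com/ylior28/my-projects | OS project/project.py | mean_ranges
-- ===== SOURCE A (Python) =====
-- def mean_ranges(args):
--     """
--     Computes defect counts based on whether sensor means fall outside the range of most other sensors.
--     """
--     segment_idx, statistics_list = args
--     # Initialize counters for each sensor
--     defect_counts = [0] * len(statistics_list)
--
--     # Iterate through each sensor's statistics
--     for i, (mean, min_val, max_val) in enumerate(statistics_list):
--         outside_range_count = 0
--
--         # Check if the mean is outside the range of other sensors
--         other_sensors_stats = [stats for j, stats in enumerate(statistics_list) if j != i]
--
--         for _, min_val_other, max_val_other in other_sensors_stats: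
--             if not (min_val_other <= mean <= max_val_other):
--                 outside_range_count += 1
--
--         # Update count only if the mean is outside the range of at least two other sensors
--         if outside_range_count > len(statistics_list)/2:
--             defect_counts[i] += 1
--
--     return defect_counts
-- ===== SOURCE B (Python) =====
-- def _bisect_left(a, x):
--     lo, hi = 0, len(a)
--     while lo < hi:
--         mid = (lo + hi) // 2
--         if a[mid] < x:
--             lo = mid + 1
--         else:
--             hi = mid
--     return lo
--
--
-- def _bisect_right(a, x):
--     lo, hi = 0, len(a)
--     while lo < hi:
--         mid = (lo + hi) // 2
--         if x < a[mid]: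
--             hi = mid
--         else:
--             lo = mid + 1
--     return lo
--
--
-- def mean_ranges(args):
--     """Sort endpoint arrays once; per sensor, count ranges its mean misses by
--     binary search (inverted min>max ranges handled exactly), subtract self."""
--     _segment_idx, stats = args
--     n = len(stats)
--     mins_all = sorted([mn for _, mn, _ in stats])
--     maxs_all = sorted([mx for _, _, mx in stats])
--     inv = [(mn, mx) for _, mn, mx in stats if mx < mn]
--     inv_mins = sorted([mn for mn, _ in inv])
--     inv_maxs = sorted([mx for _, mx in inv])
--     out = []
--     for m, mn, mx in stats:
--         above = n - _bisect_right(mins_all, m)        # ranges with m < min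
--         below = _bisect_left(maxs_all, m)             # ranges with max < m
--         cross = _bisect_left(inv_maxs, m) - _bisect_right(inv_mins, m)  # counted twice
--         outside = above + below - cross
--         if not (mn <= m <= mx):
--             outside -= 1                              # exclude self
--         out.append(1 if 2 * outside > n else 0)
--     return out
-- ===== Notes on version B (the rewrite author's own statement) =====
-- stated objective: faster
-- what changed: Replaces the per-sensor rescan of all other sensors by four endpoint arrays sorted once and per-sensor binary searches (inverted min>max ranges counted exactly via their own arrays), subtracting the sensor itself.
import Mathlib
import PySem

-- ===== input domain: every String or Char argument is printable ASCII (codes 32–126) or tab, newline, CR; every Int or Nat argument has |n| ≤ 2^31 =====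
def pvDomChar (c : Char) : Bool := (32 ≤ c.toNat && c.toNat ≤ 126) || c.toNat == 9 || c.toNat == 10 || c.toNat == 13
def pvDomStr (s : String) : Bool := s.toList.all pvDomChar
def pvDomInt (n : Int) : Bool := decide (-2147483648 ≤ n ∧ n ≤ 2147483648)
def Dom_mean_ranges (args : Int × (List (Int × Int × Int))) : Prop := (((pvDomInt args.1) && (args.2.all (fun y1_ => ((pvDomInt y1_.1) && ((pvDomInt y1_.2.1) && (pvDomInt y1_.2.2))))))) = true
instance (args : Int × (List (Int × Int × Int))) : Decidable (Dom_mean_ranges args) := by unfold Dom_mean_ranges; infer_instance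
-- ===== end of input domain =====

-- B sorts the range endpoints once and counts, for each sensor mean, the ranges it misses
-- by binary search (inverted min>max ranges via their own sorted arrays), subtracting self:
-- O(n log n) instead of A's per-sensor rescan of all other sensors.


-- ===== PORT A =====
-- inner loop: 'for _, mno, mxo in others: if not (mno <= m <= mxo): cnt += 1'
def pvCountOutside (m : Int) (others : List (Int × Int × Int)) : Int :=
  others.foldl (fun c s => if ¬(s.2.1 ≤ m ∧ m ≤ s.2.2) then c + 1 else c) 0

-- 'outside_range_count > len(statistics_list)/2' : exact for ints of this size,
-- the float comparison cnt > n/2 is equivalent to 2*cnt > n.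
def mean_ranges (args : Int × (List (Int × Int × Int))) : List Int :=
  let stats := args.2
  let defect0 : List Int := List.replicate stats.length 0
  (PySem.List.enumerate stats 0).foldl
    (fun dc p =>
      let i := p.1
      let m := p.2.1
      let others := (PySem.List.enumerate stats 0).foldl
        (fun acc q => if q.1 ≠ i then acc ++ [q.2] else acc) []
      let cnt := pvCountOutside m others
      if 2 * cnt > PySem.List.len stats then
        PySem.List.pySetD dc i (PySem.List.pyGetD dc i 0 + 1)
      else dc)
    defect0

-- ===== PORT B =====
def mean_ranges_alt (args : Int × (List (Int × Int × Int))) : List Int :=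
  let stats := args.2
  let n : Int := PySem.List.len stats
  let minsAll := PySem.List.sorted (stats.map (fun s => s.2.1)) (fun x => x) false
  let maxsAll := PySem.List.sorted (stats.map (fun s => s.2.2)) (fun x => x) false
  let inv := (stats.filter (fun s => decide (s.2.2 < s.2.1))).map (fun s => (s.2.1, s.2.2))
  let invMins := PySem.List.sorted (inv.map (fun p => p.1)) (fun x => x) false
  let invMaxs := PySem.List.sorted (inv.map (fun p => p.2)) (fun x => x) false
  stats.map (fun s =>
    let m := s.1
    let above : Int := n - (PySem.List.bisectRight minsAll m : Int)
    let below : Int := (PySem.List.bisectLeft maxsAll m : Int)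
    let cross : Int := (PySem.List.bisectLeft invMaxs m : Int) - (PySem.List.bisectRight invMins m : Int)
    let outside0 := above + below - cross
    let outside := if ¬(s.2.1 ≤ m ∧ m ≤ s.2.2) then outside0 - 1 else outside0
    if 2 * outside > n then (1 : Int) else 0)

-- ===== PRECONDITION & SPEC =====
def Spec_mean_ranges (args : Int × (List (Int × Int × Int))) (out : List Int) : Prop := out = mean_ranges_alt args
instance (args : Int × (List (Int × Int × Int))) (out : List Int) : Decidable (Spec_mean_ranges args out) := by unfold Spec_mean_ranges; infer_instance

-- ===== CLAIM (what is proved, stated in full; the proofs are below) =====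
def Claim_equal_mean_ranges : Prop := ∀ (args : Int × (List (Int × Int × Int))), Dom_mean_ranges args → Spec_mean_ranges args (mean_ranges args)

-- ===== LEMMAS AND PROOFS =====

-- L1: split point determines countP
theorem countP_of_split (p : Int → Bool) (xs : List Int) (r : Nat)
    (hr : r ≤ xs.length)
    (h1 : ∀ (j : Nat) (hj : j < xs.length), j < r → p xs[j])
    (h2 : ∀ (j : Nat) (hj : j < xs.length), r ≤ j → ¬ p xs[j]) :
    xs.countP p = r := by
  induction xs generalizing r with
  | nil => simp at hr ⊢; omega
  | cons x t ih =>
    cases r with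
    | zero =>
      simp only [List.countP_cons]
      have hx : ¬ p x := h2 0 (by simp) (by omega)
      have : t.countP p = 0 := by
        rw [List.countP_eq_zero]
        intro a ha
        obtain ⟨j, hj, rfl⟩ := List.getElem_of_mem ha
        exact h2 (j+1) (by simpa using Nat.succ_lt_succ hj) (by omega)
      simp [this, hx]
    | succ r' =>
      have hx : p x := h1 0 (by simp) (by omega)
      have := ih r' (by simpa using Nat.le_of_succ_le_succ hr)
        (fun j hj hjr => h1 (j+1) (by simpa using Nat.succ_lt_succ hj) (by omega))
        (fun j hj hjr => h2 (j+1) (by simpa using Nat.succ_lt_succ hj) (by omega))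
      simp [this, hx]

-- L2: bisectRight on sorted = count ≤ m
theorem bisectRight_sorted_count (ms : List Int) (m : Int) :
    (PySem.List.bisectRight (PySem.List.sorted ms (fun x => x) false) m : Int)
      = (ms.countP (fun x => decide (x ≤ m)) : Int) := by
  set ss := PySem.List.sorted ms (fun x => x) false with hss
  have hpw : ss.Pairwise (· ≤ ·) := PySem.List.sorted_pairwise ms (fun x => x)
  obtain ⟨hle, h1, h2⟩ := PySem.List.bisectRight_spec ss m hpw
  have hc : ss.countP (fun x => decide (x ≤ m)) = PySem.List.bisectRight ss m := by
    apply countP_of_split _ _ _ hle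
    · intro j hj hjr; simpa using h1 j hj hjr
    · intro j hj hjr; simpa using h2 j hj hjr
  rw [← hc, (PySem.List.sorted_perm ms (fun x => x) false).countP_eq]

-- L3: bisectLeft on sorted = count < m
theorem bisectLeft_sorted_count (ms : List Int) (m : Int) :
    (PySem.List.bisectLeft (PySem.List.sorted ms (fun x => x) false) m : Int)
      = (ms.countP (fun x => decide (x < m)) : Int) := by
  set ss := PySem.List.sorted ms (fun x => x) false with hss
  have hpw : ss.Pairwise (· ≤ ·) := PySem.List.sorted_pairwise ms (fun x => x)
  obtain ⟨hle, h1, h2⟩ := PySem.List.bisectLeft_spec ss m hpw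
  have hc : ss.countP (fun x => decide (x < m)) = PySem.List.bisectLeft ss m := by
    apply countP_of_split _ _ _ hle
    · intro j hj hjr; simpa using h1 j hj hjr
    · intro j hj hjr; simpa using h2 j hj hjr
  rw [← hc, (PySem.List.sorted_perm ms (fun x => x) false).countP_eq]

-- L5: per-element inclusion–exclusion for the outside count
theorem outside_incl_excl (m : Int) (L : List (Int × Int × Int)) :
    (L.countP (fun s => decide (¬(s.2.1 ≤ m ∧ m ≤ s.2.2))) : Int)
    = ((L.length : Int) - (L.countP (fun s => decide (s.2.1 ≤ m)) : Int))
      + (L.countP (fun s => decide (s.2.2 < m)) : Int)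
      - (((L.filter (fun s => decide (s.2.2 < s.2.1))).countP (fun s => decide (s.2.2 < m)) : Int)
         - ((L.filter (fun s => decide (s.2.2 < s.2.1))).countP (fun s => decide (s.2.1 ≤ m)) : Int)) := by
  induction L with
  | nil => simp
  | cons s t ih =>
    simp only [List.countP_cons, List.filter_cons, List.length_cons]
    by_cases h1 : s.2.1 ≤ m <;> by_cases h2 : m ≤ s.2.2 <;> by_cases h3 : s.2.2 < s.2.1 <;>
      by_cases h4 : s.2.2 < m <;>
      simp only [h1, h2, h3, h4, decide_true, decide_false, not_and, List.countP_cons] <;>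
      first
      | omega
      | (push_cast; omega)
      | (simp_all; try (push_cast; omega))

-- L6: the defect_counts[i] += 1 loop fills positions in order
theorem foldl_set_enumerate (C : Int × (Int × Int × Int) → Prop) [DecidablePred C] :
    ∀ (xs : List (Int × Int × Int)) (pre post : List Int),
    (PySem.List.enumerate xs (pre.length : Int)).foldl
      (fun dc p => if C p then PySem.List.pySetD dc p.1 (PySem.List.pyGetD dc p.1 0 + 1) else dc)
      (pre ++ (List.replicate xs.length 0 ++ post))
    = pre ++ (((PySem.List.enumerate xs (pre.length : Int)).map
        (fun p => if C p then (1 : Int) else 0)) ++ post) := by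
  intro xs
  induction xs with
  | nil => intro pre post; simp [PySem.List.enumerate_nil]
  | cons x t ih =>
    intro pre post
    rw [PySem.List.enumerate_cons]
    simp only [List.length_cons, List.replicate_succ, List.foldl_cons, List.map_cons, List.cons_append]
    have hget : PySem.List.pyGetD (pre ++ (0 : Int) :: (List.replicate t.length 0 ++ post)) (pre.length : Int) 0 = 0 := by
      simp [pysem]
    have hset : ∀ v : Int, PySem.List.pySetD (pre ++ (0 : Int) :: (List.replicate t.length 0 ++ post)) (pre.length : Int) v
        = pre ++ v :: (List.replicate t.length 0 ++ post) := by
      intro v; simp [pysem]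
    by_cases hc : C ((pre.length : Int), x)
    · rw [if_pos hc]
      rw [hget, hset]
      have := ih (pre ++ [(0:Int) + 1]) post
      simp only [List.length_append, List.length_singleton, List.append_assoc,
        List.singleton_append] at this ⊢
      rw [show ((pre.length : Int) + 1) = (((pre.length + 1 : Nat)) : Int) by push_cast; ring]
      simpa [hc, List.cons_append] using this
    · rw [if_neg hc]
      have := ih (pre ++ [(0:Int)]) post
      simp only [List.length_append, List.length_singleton, List.append_assoc,
        List.singleton_append] at this ⊢
      rw [show ((pre.length : Int) + 1) = (((pre.length + 1 : Nat)) : Int) by push_cast; ring]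
      simpa [hc, List.cons_append] using this

-- bridge: Prop-ite form of PySem.List.foldl_append_if
theorem foldl_append_if_prop {α β : Type} (p : α → Prop) [DecidablePred p] (f : α → β)
    (l : List α) (acc : List β) :
    l.foldl (fun acc x => if p x then acc ++ [f x] else acc) acc
      = acc ++ (l.filter (fun x => decide (p x))).map f := by
  have := PySem.List.foldl_append_if (fun x => decide (p x)) f l acc
  simpa using this

-- L4: the 'others' list drops exactly the sensor itself
theorem countP_others (P : (Int × Int × Int) → Bool) (stats : List (Int × Int × Int))
    (k : Nat) (hk : k < stats.length) :
    ((((PySem.List.enumerate stats 0).filter (fun q => decide (q.1 ≠ (k : Int)))).map Prod.snd).countP P : Int)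
    = (stats.countP P : Int) - (if P stats[k] then 1 else 0) := by
  have hdec : stats = stats.take k ++ stats[k] :: stats.drop (k + 1) := by
    conv_lhs => rw [← List.take_append_drop k stats]
    rw [List.drop_eq_getElem_cons hk]
  have hlt : (stats.take k).length = k := by simp [List.length_take]; omega
  conv_lhs => rw [hdec]
  rw [PySem.List.enumerate_append, PySem.List.enumerate_cons, List.filter_append, List.filter_cons]
  have hmid : (decide (((0 : Int) + (stats.take k).length) ≠ (k : Int))) = false := by
    simp [hlt]
  rw [hmid]
  have hkeep1 : (PySem.List.enumerate (stats.take k) 0).filter (fun q => decide (q.1 ≠ (k : Int)))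
      = PySem.List.enumerate (stats.take k) 0 := by
    rw [List.filter_eq_self]
    intro q hq
    obtain ⟨j, hj, rfl⟩ := (PySem.List.mem_enumerate_iff _ _ _).mp hq
    simp only [decide_eq_true_eq]
    rw [hlt] at hj; intro h; omega
  have hkeep2 : (PySem.List.enumerate (stats.drop (k+1)) ((0 : Int) + (stats.take k).length + 1)).filter
        (fun q => decide (q.1 ≠ (k : Int)))
      = PySem.List.enumerate (stats.drop (k+1)) ((0 : Int) + (stats.take k).length + 1) := by
    rw [List.filter_eq_self]
    intro q hq
    obtain ⟨j, hj, rfl⟩ := (PySem.List.mem_enumerate_iff _ _ _).mp hq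
    simp only [decide_eq_true_eq]
    rw [hlt]; intro h; omega
  simp only [Bool.false_eq_true, if_false]
  rw [hkeep1, hkeep2, List.map_append]
  have hsnd : ∀ (xs : List (Int × Int × Int)) (s : Int),
      (PySem.List.enumerate xs s).map Prod.snd = xs := by
    intro xs s
    simpa using PySem.List.map_snd_enumerate xs s
  rw [hsnd, hsnd]
  have hcnt : List.countP P stats
      = List.countP P (stats.take k ++ stats[k] :: stats.drop (k + 1)) := by rw [← hdec]
  rw [hcnt, List.countP_append, List.countP_append, List.countP_cons]
  push_cast
  split_ifs <;> omega


-- assembly helpers (proof-only)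
def pvOthers (stats : List (Int × Int × Int)) (i : Int) : List (Int × Int × Int) :=
  (PySem.List.enumerate stats 0).foldl (fun acc q => if q.1 ≠ i then acc ++ [q.2] else acc) []

theorem pvOthers_countP (stats : List (Int × Int × Int)) (m : Int) (k : Nat) (hk : k < stats.length) :
    pvCountOutside m (pvOthers stats (k : Int))
    = (stats.countP (fun s => decide (¬(s.2.1 ≤ m ∧ m ≤ s.2.2))) : Int)
      - (if (fun s => decide (¬(s.2.1 ≤ m ∧ m ≤ s.2.2))) stats[k] then 1 else 0) := by
  rw [pvCountOutside, pvOthers, foldl_append_if_prop, List.nil_append,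
    PySem.List.foldl_ite_add_one, zero_add]
  exact countP_others _ stats k hk

-- ===== VERDICT (by name: the statement is the Claim_ definition above) =====
theorem mean_ranges_spec : Claim_equal_mean_ranges := by
  unfold Claim_equal_mean_ranges
  intro args _
  unfold Spec_mean_ranges
  obtain ⟨seg, stats⟩ := args
  have hA : mean_ranges (seg, stats)
      = (PySem.List.enumerate stats 0).map
          (fun p => if 2 * pvCountOutside p.2.1 (pvOthers stats p.1) > PySem.List.len stats then (1:Int) else 0) := by
    have h := foldl_set_enumerate
      (fun p => 2 * pvCountOutside p.2.1 (pvOthers stats p.1) > PySem.List.len stats) stats [] []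
    simp only [List.length_nil, Nat.cast_zero, List.nil_append, List.append_nil] at h
    simpa [mean_ranges, pvOthers] using h
  rw [hA]
  simp only [mean_ranges_alt]
  apply List.ext_getElem
  · simp [PySem.List.length_enumerate]
  intro k h1 h2
  have hk : k < stats.length := by simpa [PySem.List.length_enumerate] using h1
  simp only [List.getElem_map, PySem.List.getElem_enumerate, zero_add]
  have hcore : pvCountOutside stats[k].1 (pvOthers stats (k : Int))
      = (PySem.List.len stats - (PySem.List.bisectRight (PySem.List.sorted (stats.map (fun s => s.2.1)) (fun x => x) false) stats[k].1 : Int))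
        + (PySem.List.bisectLeft (PySem.List.sorted (stats.map (fun s => s.2.2)) (fun x => x) false) stats[k].1 : Int)
        - ((PySem.List.bisectLeft (PySem.List.sorted (((stats.filter (fun s => decide (s.2.2 < s.2.1))).map (fun s => (s.2.1, s.2.2))).map (fun p => p.2)) (fun x => x) false) stats[k].1 : Int)
           - (PySem.List.bisectRight (PySem.List.sorted (((stats.filter (fun s => decide (s.2.2 < s.2.1))).map (fun s => (s.2.1, s.2.2))).map (fun p => p.1)) (fun x => x) false) stats[k].1 : Int))
        - (if ¬(stats[k].2.1 ≤ stats[k].1 ∧ stats[k].1 ≤ stats[k].2.2) then 1 else 0) := by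
    rw [pvOthers_countP stats stats[k].1 k hk]
    rw [bisectRight_sorted_count, bisectLeft_sorted_count, bisectLeft_sorted_count,
      bisectRight_sorted_count]
    rw [outside_incl_excl stats[k].1 stats]
    simp only [List.countP_map, List.map_map, PySem.List.len_eq, Function.comp_def]
    simp only [decide_eq_true_eq]
  rw [hcore]
  by_cases hc : (stats[k].2.1 ≤ stats[k].1 ∧ stats[k].1 ≤ stats[k].2.2)
  · rw [if_neg (not_not_intro hc), if_neg (not_not_intro hc), sub_zero]
  · rw [if_pos hc, if_pos hc]
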